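-- pv_equiv track=rewrite | github.com/mfdz/transit-stops-osm-comparison | models/stage/zhv_expanded_names.py | chars_in_word
-- ===== SOURCE A (Python) =====
-- def chars_in_word(abbr, word):
--     min_index = 0
--     for char in abbr:
--         if '.' == char:
--             continue
--         pos = word.find(char, min_index)
--         if pos == -1:
--             return False
--         min_index = pos + 1
--     return True
-- ===== SOURCE B (Python) =====
-- def chars_in_word(abbr, word):
--     # Match by walking WORD once, advancing a pointer into the dot-stripped abbr.
--     target = [c for c in abbr if c != '.']
--     i = 0
--     for ch in word:
--         if i < len(target) and target[i] == ch:
--             i += 1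
--     return i == len(target)
-- ===== Notes on version B (the rewrite author's own statement) =====
-- stated objective: alternative
-- what changed: B strips dots from abbr once, then drives a single loop over word advancing a pointer into the stripped abbr, instead of A's loop over abbr with repeated word.find(char, min_index) scans.
import Mathlib
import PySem

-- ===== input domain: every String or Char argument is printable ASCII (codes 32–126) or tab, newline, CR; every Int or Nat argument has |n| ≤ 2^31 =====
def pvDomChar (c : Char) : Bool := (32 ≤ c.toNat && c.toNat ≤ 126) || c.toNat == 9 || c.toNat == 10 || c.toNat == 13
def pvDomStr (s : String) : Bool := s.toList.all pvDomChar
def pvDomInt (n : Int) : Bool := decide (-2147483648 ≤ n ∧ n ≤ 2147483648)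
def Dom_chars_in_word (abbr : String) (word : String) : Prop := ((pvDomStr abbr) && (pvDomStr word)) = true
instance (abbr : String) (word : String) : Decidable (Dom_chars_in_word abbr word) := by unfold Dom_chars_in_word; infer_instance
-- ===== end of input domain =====

-- B replaces A's abbr-driven loop with repeated word.find(char, min_index) scans by a single
-- pass over word advancing a pointer into the dot-stripped abbr (objective: alternative).

-- ===== PORT A =====
-- Loop over abbr carrying min_index; word.find(char, min_index) is PySem.Chars.findFrom.
-- min_index is kept as a Nat: in A it is 0 or pos+1 with pos a found index, always ≥ 0.
def charsInWordGo (word : List Char) : List Char → Nat → Bool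
  | [], _ => true
  | c :: rest, minIndex =>
    if '.' = c then charsInWordGo word rest minIndex
    else
      let pos := PySem.Chars.findFrom word [c] (minIndex : Int)
      if pos = -1 then false
      else charsInWordGo word rest (pos.toNat + 1)

def chars_in_word (abbr : String) (word : String) : Bool :=
  charsInWordGo word.toList abbr.toList 0

-- ===== PORT B =====
def chars_in_word_alt (abbr : String) (word : String) : Bool :=
  let target := abbr.toList.filter (fun c => c ≠ '.')
  let i := word.toList.foldl
    (fun i ch => if i < target.length ∧ target[i]? = some ch then i + 1 else i) 0
  i == target.length

-- ===== PRECONDITION & SPEC =====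
def Spec_chars_in_word (abbr : String) (word : String) (out : Bool) : Prop := out = chars_in_word_alt abbr word
instance (abbr : String) (word : String) (out : Bool) : Decidable (Spec_chars_in_word abbr word out) := by unfold Spec_chars_in_word; infer_instance

-- ===== CLAIM (what is proved, stated in full; the proofs are below) =====
def Claim_equal_chars_in_word : Prop := ∀ (abbr : String) (word : String), Dom_chars_in_word abbr word → Spec_chars_in_word abbr word (chars_in_word abbr word)

-- ===== LEMMAS AND PROOFS =====

/-- Reference predicate: `t` is a subsequence of `w`, decided greedily. -/
def subseq : List Char → List Char → Bool
  | [], _ => true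
  | _ :: _, [] => false
  | c :: t, x :: w => if x = c then subseq t w else subseq (c :: t) w

theorem subseq_nil (w : List Char) : subseq [] w = true := by cases w <;> rfl

theorem singleton_prefix_cons {c x : Char} {w : List Char} :
    [c] <+: x :: w ↔ c = x := by
  simp [List.cons_prefix_cons]

/-- If `c` occurs nowhere in `w`, the subsequence test fails. -/
theorem subseq_of_no_occ (c : Char) (t w : List Char)
    (h : ∀ m, ¬ [c] <+: w.drop m) : subseq (c :: t) w = false := by
  induction w with
  | nil => rfl
  | cons x w ih =>
    have hx : x ≠ c := fun he => h 0 (by simp [he])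
    simpa [subseq, hx] using ih (fun m => h (m + 1))

/-- Greedy step: matching `c` at its first occurrence `q` in `w` is exact. -/
theorem subseq_greedy (c : Char) (t w : List Char) (q : Nat)
    (h1 : [c] <+: w.drop q) (h2 : ∀ m < q, ¬ [c] <+: w.drop m) :
    subseq (c :: t) w = subseq t (w.drop (q + 1)) := by
  induction w generalizing q with
  | nil => simp at h1
  | cons x w ih =>
    cases q with
    | zero =>
      have h1' : [c] <+: x :: w := by simpa using h1
      have hx : x = c := (singleton_prefix_cons.mp h1').symm
      simp [subseq, hx]
    | succ q =>
      have hx : x ≠ c := fun he => h2 0 (Nat.succ_pos q) (by simp [he])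
      have hrec := ih q (by simpa using h1) (fun m hm => by
        have := h2 (m + 1) (Nat.succ_lt_succ hm); simpa using this)
      simpa [subseq, hx] using hrec

theorem singleton_infix_iff {c : Char} {w : List Char} :
    [c] <:+: w ↔ ∃ m, [c] <+: w.drop m := by
  rw [← PySem.Chars.isIn_iff_infix, ← PySem.Chars.exists_prefix_drop_iff_isIn]

/-- A's loop equals the greedy subsequence test on the dot-stripped rest of abbr. -/
theorem charsInWordGo_eq (word : List Char) (abbr : List Char) :
    ∀ i : Nat, i ≤ word.length →
      charsInWordGo word abbr i = subseq (abbr.filter (fun c => c ≠ '.')) (word.drop i) := by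
  induction abbr with
  | nil => intro i _; simp [charsInWordGo, subseq_nil]
  | cons c rest ih =>
    intro i hi
    by_cases hc : '.' = c
    · simp [charsInWordGo, ← hc, ih i hi]
    · have hc' : c ≠ '.' := fun h => hc h.symm
      by_cases hpos : PySem.Chars.findFrom word [c] (i : Int) = -1
      · have hinf : ¬ [c] <:+: word.drop i :=
          (PySem.Chars.findFrom_natCast_eq_neg_one_iff word [c] i hi).mp hpos
        have hno : ∀ m, ¬ [c] <+: (word.drop i).drop m := by
          intro m hm
          exact hinf (singleton_infix_iff.mpr ⟨m, hm⟩)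
        simp [charsInWordGo, hc, hc', hpos, subseq_of_no_occ c _ _ hno]
      · obtain ⟨hle, hpre, hmin⟩ :=
          PySem.Chars.findFrom_natCast_spec word [c] i hi hpos
        set p : Nat := (PySem.Chars.findFrom word [c] (i : Int)).toNat with hp
        have hip : i ≤ p := by omega
        have hplen : p < word.length := by
          rcases hpre with ⟨s, hs⟩
          have := congrArg List.length hs
          simp [List.length_drop] at this
          omega
        have h1 : [c] <+: (word.drop i).drop (p - i) := by
          rw [List.drop_drop]
          have he : i + (p - i) = p := by omega
          rwa [he]
        have h2 : ∀ m < p - i, ¬ [c] <+: (word.drop i).drop m := by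
          intro m hm
          rw [List.drop_drop]
          exact hmin (i + m) (by omega) (by omega)
        have hrec := ih (p + 1) (by omega)
        have hg := subseq_greedy c (rest.filter (fun c => c ≠ '.')) (word.drop i) (p - i) h1 h2
        rw [List.drop_drop] at hg
        have hpq : i + (p - i + 1) = p + 1 := by omega
        rw [hpq] at hg
        have hA : charsInWordGo word (c :: rest) i = charsInWordGo word rest (p + 1) := by
          simp [charsInWordGo, hc, hpos, hp]
        rw [hA, hrec, List.filter_cons_of_pos (by simp [hc'])]
        exact hg.symm

/-- B's fold over word equals the greedy subsequence test on the remaining target. -/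
theorem foldB_eq (target : List Char) :
    ∀ (w : List Char) (i : Nat), i ≤ target.length →
      ((w.foldl (fun i ch => if i < target.length ∧ target[i]? = some ch then i + 1 else i) i)
        == target.length) = subseq (target.drop i) w := by
  intro w
  induction w with
  | nil =>
    intro i hi
    by_cases h : i = target.length
    · simp [h, subseq_nil]
    · have hlt : i < target.length := by omega
      rw [List.drop_eq_getElem_cons hlt]
      simp [subseq, h]
  | cons x w ih =>
    intro i hi
    by_cases h : i < target.length ∧ target[i]? = some x
    · have hget : target[i]'h.1 = x := by
        have h2 := h.2; rw [List.getElem?_eq_getElem h.1] at h2; exact Option.some.inj h2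
      rw [List.foldl_cons, if_pos h, ih (i + 1) h.1,
        List.drop_eq_getElem_cons h.1, hget]
      simp [subseq]
    · rw [List.foldl_cons, if_neg h, ih i hi]
      by_cases hlen : i = target.length
      · simp [hlen, subseq_nil]
      · have hlt : i < target.length := by omega
        have hne : x ≠ target[i]'hlt := by
          intro he
          exact h ⟨hlt, by rw [List.getElem?_eq_getElem hlt, he]⟩
        rw [List.drop_eq_getElem_cons hlt]
        simp [subseq, hne]

-- ===== VERDICT (by name: the statement is the Claim_ definition above) =====
theorem chars_in_word_spec : Claim_equal_chars_in_word := by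
  intro abbr word _
  unfold Spec_chars_in_word chars_in_word chars_in_word_alt
  rw [charsInWordGo_eq word.toList abbr.toList 0 (Nat.zero_le _)]
  have hB := foldB_eq (abbr.toList.filter (fun c => c ≠ '.')) word.toList 0 (Nat.zero_le _)
  simp only [List.drop_zero] at hB ⊢
  exact hB.symm
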